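-- pv_equiv track=rewrite | github.com/aliuyar1234/language-neutral-or-language-specific | src/brain_subspace_paper/data/sentence_spans.py | _parse_tree_leaves
-- ===== SOURCE A (Python) =====
-- def _parse_tree_leaves(tree_line: str) -> list[str]:
--     text = tree_line.strip()
--     if not text:
--         return []
--
--     n_chars = len(text)
--     pointer = 0
--     leaves: list[str] = []
--
--     def skip_ws(index: int) -> int:
--         while index < n_chars and text[index].isspace():
--             index += 1
--         return index
--
--     def parse_node(index: int) -> tuple[list[str], int]:
--         assert text[index] == "("
--         index += 1
--         index = skip_ws(index)
--         while index < n_chars and not text[index].isspace() and text[index] not in "()":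
--             index += 1
--         index = skip_ws(index)
--
--         node_leaves: list[str] = []
--         if index < n_chars and text[index] == "(":
--             while index < n_chars and text[index] == "(":
--                 child_leaves, index = parse_node(index)
--                 node_leaves.extend(child_leaves)
--                 index = skip_ws(index)
--         else:
--             start = index
--             while index < n_chars and text[index] != ")":
--                 index += 1
--             token = text[start:index].strip()
--             if token:
--                 node_leaves.extend(part for part in token.split() if part)
--
--         if index < n_chars and text[index] == ")":
--             index += 1
--         return node_leaves, skip_ws(index)
--
--     while pointer < n_chars:
--         pointer = skip_ws(pointer)
--         if pointer < n_chars and text[pointer] == "(":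
--             node_leaves, pointer = parse_node(pointer)
--             leaves.extend(node_leaves)
--         else:
--             pointer += 1
--
--     return leaves
-- ===== SOURCE B (Python) =====
-- def _parse_tree_leaves(tree_line: str) -> list[str]:
--     # Flat single-pass scanner: no recursion, no stack. Equivalent because the original
--     # also consumes every closing parenthesis and every stray character exactly one
--     # position at a time, so nesting depth never affects the output.
--     text = tree_line.strip()
--     n = len(text)
--     i = 0
--     leaves: list[str] = []
--     while i < n:
--         if text[i] != "(":
--             i += 1
--             continue
--         # open a node: consume '(', then whitespace, the label token, whitespace
--         i += 1
--         while i < n and text[i].isspace():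
--             i += 1
--         while i < n and not text[i].isspace() and text[i] not in "()":
--             i += 1
--         while i < n and text[i].isspace():
--             i += 1
--         if i < n and text[i] == "(":
--             continue  # children follow; the main loop opens them
--         # leaf node: its words run up to the closing ')'
--         start = i
--         while i < n and text[i] != ")":
--             i += 1
--         leaves.extend(text[start:i].split())
--         if i < n and text[i] == ")":
--             i += 1
--     return leaves
-- ===== Notes on version B (the rewrite author's own statement) =====
-- stated objective: simpler
-- what changed: Replaces A's recursive-descent parser (nested parse_node recursion plus a per-node children while-loop) with a single flat scan over the text using no recursion and no stack, exploiting the fact that A consumes every closing parenthesis and every stray character exactly one position at a time regardless of nesting depth.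
import Mathlib
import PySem

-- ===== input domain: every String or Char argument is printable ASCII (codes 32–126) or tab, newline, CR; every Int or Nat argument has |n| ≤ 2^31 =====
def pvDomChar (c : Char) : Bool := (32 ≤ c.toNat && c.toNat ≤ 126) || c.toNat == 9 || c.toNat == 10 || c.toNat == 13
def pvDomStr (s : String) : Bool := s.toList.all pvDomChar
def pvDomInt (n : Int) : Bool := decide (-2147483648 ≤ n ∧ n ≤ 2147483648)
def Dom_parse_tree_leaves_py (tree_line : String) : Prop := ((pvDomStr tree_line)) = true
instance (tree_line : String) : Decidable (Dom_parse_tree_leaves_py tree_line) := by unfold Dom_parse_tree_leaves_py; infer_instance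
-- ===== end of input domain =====

-- B replaces A's recursive-descent parser by a single flat scan with no recursion and no
-- stack (simpler); equivalence holds because A consumes closers and stray chars one position at a time.

-- Shared character scanners: both Pythons contain these identical while-loops
-- (skip whitespace / skip a label token / collect leaf text up to ')').
def pvSkipWs : List Char → List Char
  | [] => []
  | c :: r => if PySem.Chars.isspace c then pvSkipWs r else c :: r

def pvScanLabel : List Char → List Char
  | [] => []
  | c :: r => if !PySem.Chars.isspace c && c ≠ '(' && c ≠ ')' then pvScanLabel r else c :: r

def pvScanLeaf : List Char → List Char × List Char
  | [] => ([], [])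
  | c :: r => if c = ')' then ([], c :: r) else
      let p := pvScanLeaf r
      (c :: p.1, p.2)

-- ===== PORT A ===== (recursive descent, as in the Python: parse_node + its children
-- while-loop + the top-level while-loop; recursion made total by a fuel argument that is
-- always sufficient since every parse_node call consumes its opening '(')
mutual
def pvParseNodeA : Nat → List Char → List String × List Char
  | 0, l => ([], l)
  | f+1, l =>
    let l1 := pvSkipWs l.tail                       -- index += 1 (past '('); skip_ws
    let l2 := pvSkipWs (pvScanLabel l1)             -- skip label token; skip_ws
    let q :=
      if l2.head? = some '(' then pvChildLoopA f l2
      else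
        let p := pvScanLeaf l2
        let token := PySem.Chars.strip p.1
        ((if token = [] then []
          else ((PySem.Chars.split₀ token).filter (fun w => w ≠ [])).map String.ofList), p.2)
    (q.1, pvSkipWs (if q.2.head? = some ')' then q.2.tail else q.2))

def pvChildLoopA : Nat → List Char → List String × List Char
  | 0, l => ([], l)
  | f+1, l =>
    let q := pvParseNodeA f l
    let l'' := pvSkipWs q.2                          -- index = skip_ws(index)
    if l''.head? = some '(' then
      let q2 := pvChildLoopA f l''
      (q.1 ++ q2.1, q2.2)
    else (q.1, l'')
end

def pvTopA : Nat → List Char → List String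
  | 0, _ => []
  | f+1, l =>
    match pvSkipWs l with
    | [] => []                                       -- pointer reaches n: loop ends
    | c :: r =>
      if c = '(' then
        let p := pvParseNodeA (2 * r.length + 4) (c :: r)
        p.1 ++ pvTopA f p.2
      else pvTopA f r                                -- pointer += 1

def parse_tree_leaves_py (tree_line : String) : List String :=
  let text := (PySem.Str.strip tree_line).toList
  if text = [] then []
  else pvTopA (text.length + 1) text

-- ===== PORT B ===== (flat single-pass scanner: one loop over the text, no recursion)
def pvBLoop : Nat → List Char → List String
  | 0, _ => []
  | _+1, [] => []
  | f+1, c :: r =>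
    if c ≠ '(' then pvBLoop f r
    else
      let l2 := pvSkipWs (pvScanLabel (pvSkipWs r))  -- consume '(', ws, label, ws
      if l2.head? = some '(' then pvBLoop f l2       -- children follow: main loop opens them
      else
        let p := pvScanLeaf l2
        (PySem.Chars.split₀ p.1).map String.ofList ++
          pvBLoop f (if p.2.head? = some ')' then p.2.tail else p.2)

def parse_tree_leaves_py_alt (tree_line : String) : List String :=
  let cs := (PySem.Str.strip tree_line).toList
  pvBLoop (cs.length + 1) cs

-- ===== PRECONDITION & SPEC =====
def Spec_parse_tree_leaves_py (tree_line : String) (out : List String) : Prop := out = parse_tree_leaves_py_alt tree_line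
instance (tree_line : String) (out : List String) : Decidable (Spec_parse_tree_leaves_py tree_line out) := by unfold Spec_parse_tree_leaves_py; infer_instance

-- ===== CLAIM (what is proved, stated in full; the proofs are below) =====
def Claim_equal_parse_tree_leaves_py : Prop := ∀ (tree_line : String), Dom_parse_tree_leaves_py tree_line → Spec_parse_tree_leaves_py tree_line (parse_tree_leaves_py tree_line)

-- ===== LEMMAS AND PROOFS =====

-- length bounds for the scanners
theorem pvSkipWs_len (l : List Char) : (pvSkipWs l).length ≤ l.length := by
  induction l with
  | nil => simp [pvSkipWs]
  | cons c r ih => simp only [pvSkipWs]; split <;> simp <;> omega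

theorem pvScanLabel_len (l : List Char) : (pvScanLabel l).length ≤ l.length := by
  induction l with
  | nil => simp [pvScanLabel]
  | cons c r ih => simp only [pvScanLabel]; split <;> simp <;> omega

theorem pvScanLeaf_len (l : List Char) : (pvScanLeaf l).2.length ≤ l.length := by
  induction l with
  | nil => simp [pvScanLeaf]
  | cons c r ih => simp only [pvScanLeaf]; split <;> simp <;> omega

theorem pvIsspace_ne_lpar {c : Char} (h : PySem.Chars.isspace c = true) : c ≠ '(' := by
  rintro rfl; simp [PySem.Chars.isspace] at h

-- the canonical B value, fuel pinned to the length
def pvB (l : List Char) : List String := pvBLoop (l.length + 1) l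

theorem pvBLoop_stable : ∀ f g l, l.length < f → l.length < g → pvBLoop f l = pvBLoop g l := by
  intro f
  induction f with
  | zero => intro g l h; omega
  | succ f ih =>
    intro g l hf hg
    match g, hg with
    | g+1, hg =>
      match l with
      | [] => simp [pvBLoop]
      | c :: r =>
        simp only [pvBLoop]
        by_cases hc : c = '('
        · subst hc
          simp only [ne_eq, not_true_eq_false, if_false]
          have hl2 : (pvSkipWs (pvScanLabel (pvSkipWs r))).length ≤ r.length :=
            le_trans (pvSkipWs_len _) (le_trans (pvScanLabel_len _) (pvSkipWs_len _))
          simp only [List.length_cons] at hf hg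
          by_cases hh : (pvSkipWs (pvScanLabel (pvSkipWs r))).head? = some '('
          · simp only [hh, if_pos]
            exact ih g _ (by omega) (by omega)
          · simp only [hh, if_false]
            have h1 : (pvScanLeaf (pvSkipWs (pvScanLabel (pvSkipWs r)))).2.length ≤ r.length :=
              le_trans (pvScanLeaf_len _) hl2
            have h2 : ((if (pvScanLeaf (pvSkipWs (pvScanLabel (pvSkipWs r)))).2.head? = some ')' then (pvScanLeaf (pvSkipWs (pvScanLabel (pvSkipWs r)))).2.tail else (pvScanLeaf (pvSkipWs (pvScanLabel (pvSkipWs r)))).2)).length ≤ r.length := by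
              split
              · have := List.length_tail (l := (pvScanLeaf (pvSkipWs (pvScanLabel (pvSkipWs r)))).2)
                omega
              · exact h1
            rw [ih g (if (pvScanLeaf (pvSkipWs (pvScanLabel (pvSkipWs r)))).2.head? = some ')' then (pvScanLeaf (pvSkipWs (pvScanLabel (pvSkipWs r)))).2.tail else (pvScanLeaf (pvSkipWs (pvScanLabel (pvSkipWs r)))).2) (by omega) (by omega)]
        · simp only [hc, ne_eq, not_false_eq_true, if_true]
          simp only [List.length_cons] at hf hg
          exact ih g r (by omega) (by omega)

theorem pvB_cons_ne {c : Char} (r : List Char) (h : c ≠ '(') : pvB (c :: r) = pvB r := by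
  simp [pvB, pvBLoop, h]

theorem pvB_skipWs (l : List Char) : pvB (pvSkipWs l) = pvB l := by
  induction l with
  | nil => simp [pvSkipWs]
  | cons c r ih =>
    simp only [pvSkipWs]
    split
    · rename_i hs
      rw [ih, pvB_cons_ne r (pvIsspace_ne_lpar hs)]
    · rfl

theorem pvB_open (r : List Char) :
    pvB ('(' :: r) =
      (let l2 := pvSkipWs (pvScanLabel (pvSkipWs r))
       if l2.head? = some '(' then pvB l2
       else
         let p := pvScanLeaf l2
         (PySem.Chars.split₀ p.1).map String.ofList ++
           pvB (if p.2.head? = some ')' then p.2.tail else p.2)) := by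
  have hl2 : (pvSkipWs (pvScanLabel (pvSkipWs r))).length ≤ r.length :=
    le_trans (pvSkipWs_len _) (le_trans (pvScanLabel_len _) (pvSkipWs_len _))
  simp only [pvB, List.length_cons, pvBLoop, ne_eq, not_true_eq_false, if_false]
  by_cases hh : (pvSkipWs (pvScanLabel (pvSkipWs r))).head? = some '('
  · simp only [hh, if_pos]
    exact pvBLoop_stable _ _ _ (by omega) (by omega)
  · simp only [hh, if_false]
    have h1 : (pvScanLeaf (pvSkipWs (pvScanLabel (pvSkipWs r)))).2.length ≤ r.length :=
      le_trans (pvScanLeaf_len _) hl2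
    have h2 : ((if (pvScanLeaf (pvSkipWs (pvScanLabel (pvSkipWs r)))).2.head? = some ')' then (pvScanLeaf (pvSkipWs (pvScanLabel (pvSkipWs r)))).2.tail else (pvScanLeaf (pvSkipWs (pvScanLabel (pvSkipWs r)))).2)).length ≤ r.length := by
      split
      · have := List.length_tail (l := (pvScanLeaf (pvSkipWs (pvScanLabel (pvSkipWs r)))).2)
        omega
      · exact h1
    rw [pvBLoop_stable (r.length + 1) ((if (pvScanLeaf (pvSkipWs (pvScanLabel (pvSkipWs r)))).2.head? = some ')' then (pvScanLeaf (pvSkipWs (pvScanLabel (pvSkipWs r)))).2.tail else (pvScanLeaf (pvSkipWs (pvScanLabel (pvSkipWs r)))).2).length + 1) (if (pvScanLeaf (pvSkipWs (pvScanLabel (pvSkipWs r)))).2.head? = some ')' then (pvScanLeaf (pvSkipWs (pvScanLabel (pvSkipWs r)))).2.tail else (pvScanLeaf (pvSkipWs (pvScanLabel (pvSkipWs r)))).2) (by omega) (by omega)]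

-- closing a node: consuming an optional ')' (and whitespace) never changes the flat scan
theorem pvB_close' (l : List Char) : pvB (if l.head? = some ')' then l.tail else l) = pvB l := by
  cases l with
  | nil => simp
  | cons a b =>
    by_cases ha : a = ')'
    · subst ha
      simp only [List.head?_cons, if_pos rfl, List.tail_cons]
      exact (pvB_cons_ne b (by decide)).symm
    · rw [if_neg (by simp [ha])]

theorem pvB_close (l : List Char) :
    pvB (pvSkipWs (if l.head? = some ')' then l.tail else l)) = pvB l := by
  rw [pvB_skipWs, pvB_close']

-- facts about Python's str.split() used to collapse A's token bookkeeping
theorem pvGo_all_space : ∀ (s cur : List Char) (acc : List (List Char)),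
    (∀ c ∈ s, PySem.Chars.isspace c = true) →
    PySem.Chars.split₀.go s cur acc =
      (if cur.isEmpty then acc.reverse else (cur.reverse :: acc).reverse) := by
  intro s
  induction s with
  | nil => intro cur acc _; rfl
  | cons c r ih =>
    intro cur acc h
    have hc : PySem.Chars.isspace c = true := h c (by simp)
    have hr : ∀ x ∈ r, PySem.Chars.isspace x = true := fun x hx => h x (List.mem_cons_of_mem _ hx)
    simp only [PySem.Chars.split₀.go, hc, if_true]
    by_cases hcur : cur.isEmpty
    · simp [hcur, ih _ _ hr]
    · simp [hcur, ih _ _ hr]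

theorem pvGo_append_space : ∀ (a sp cur : List Char) (acc : List (List Char)),
    (∀ c ∈ sp, PySem.Chars.isspace c = true) →
    PySem.Chars.split₀.go (a ++ sp) cur acc = PySem.Chars.split₀.go a cur acc := by
  intro a
  induction a with
  | nil =>
    intro sp cur acc h
    simp only [List.nil_append]
    rw [pvGo_all_space sp cur acc h]
    rfl
  | cons c r ih =>
    intro sp cur acc h
    simp only [List.cons_append, PySem.Chars.split₀.go]
    by_cases hc : PySem.Chars.isspace c
    · simp only [hc, if_true]
      by_cases hcur : cur.isEmpty
      · simp [hcur, ih _ _ _ h]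
      · simp [hcur, ih _ _ _ h]
    · simp only [hc, if_false]
      simp [ih _ _ _ h]

theorem pvSplit_lstrip (t : List Char) :
    PySem.Chars.split₀ (PySem.Chars.lstrip t) = PySem.Chars.split₀ t := by
  induction t with
  | nil => rfl
  | cons c r ih =>
    by_cases hc : PySem.Chars.isspace c
    · have h1 : PySem.Chars.lstrip (c :: r) = PySem.Chars.lstrip r := by
        simp [PySem.Chars.lstrip, List.dropWhile_cons, hc]
      rw [h1, ih]
      show _ = PySem.Chars.split₀.go (c :: r) [] []
      simp [PySem.Chars.split₀.go, hc, PySem.Chars.split₀]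
    · simp [PySem.Chars.lstrip, List.dropWhile_cons, hc]

theorem pvSplit_rstrip (t : List Char) :
    PySem.Chars.split₀ (PySem.Chars.rstrip t) = PySem.Chars.split₀ t := by
  have hdec : t = PySem.Chars.rstrip t ++ (List.takeWhile PySem.Chars.isspace t.reverse).reverse := by
    simp only [PySem.Chars.rstrip]
    rw [← List.reverse_append]
    rw [List.takeWhile_append_dropWhile (p := PySem.Chars.isspace) (l := t.reverse)]
    rw [List.reverse_reverse]
  conv_rhs => rw [hdec]
  show _ = PySem.Chars.split₀.go _ [] []
  rw [pvGo_append_space]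
  · rfl
  · intro c hc
    exact List.mem_takeWhile_imp (List.mem_reverse.mp hc)

theorem pvSplit_strip (t : List Char) :
    PySem.Chars.split₀ (PySem.Chars.strip t) = PySem.Chars.split₀ t := by
  simp [PySem.Chars.strip, pvSplit_rstrip, pvSplit_lstrip]

theorem pvSplit_ne_nil : ∀ (s cur : List Char) (acc : List (List Char)),
    (∀ p ∈ acc, p ≠ []) → ∀ p ∈ PySem.Chars.split₀.go s cur acc, p ≠ [] := by
  intro s
  induction s with
  | nil =>
    intro cur acc hacc p hp
    simp only [PySem.Chars.split₀.go] at hp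
    by_cases hcur : cur.isEmpty
    · simp only [hcur, if_true] at hp
      exact hacc p (List.mem_reverse.mp hp)
    · simp only [hcur, Bool.false_eq_true, if_false] at hp
      rw [List.mem_reverse] at hp
      rcases List.mem_cons.mp hp with h | h
      · subst h
        simp only [ne_eq, List.reverse_eq_nil_iff]
        exact fun hcc => by simp [hcc] at hcur
      · exact hacc p h
  | cons c r ih =>
    intro cur acc hacc p hp
    simp only [PySem.Chars.split₀.go] at hp
    by_cases hc : PySem.Chars.isspace c
    · simp only [hc, if_true] at hp
      by_cases hcur : cur.isEmpty
      · simp only [hcur, if_true] at hp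
        exact ih _ _ hacc p hp
      · simp only [hcur, Bool.false_eq_true, if_false] at hp
        refine ih _ _ ?_ p hp
        intro q hq
        rcases List.mem_cons.mp hq with h | h
        · subst h
          simp only [ne_eq, List.reverse_eq_nil_iff]
          exact fun hcc => by simp [hcc] at hcur
        · exact hacc q h
    · simp only [hc, Bool.false_eq_true, if_false] at hp
      exact ih _ _ hacc p hp

theorem pvStrip_nil_split (t : List Char) (h : PySem.Chars.strip t = []) :
    PySem.Chars.split₀ t = [] := by
  rw [← pvSplit_strip, h]; rfl

-- A's token.strip()/"if token"/split-and-filter collapses to B's plain split()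
theorem pvToken_eq (t : List Char) :
    (if PySem.Chars.strip t = [] then []
     else ((PySem.Chars.split₀ (PySem.Chars.strip t)).filter (fun w => w ≠ [])).map String.ofList)
      = (PySem.Chars.split₀ t).map String.ofList := by
  by_cases h : PySem.Chars.strip t = []
  · simp [h, pvStrip_nil_split t h]
  · simp only [h, if_false, pvSplit_strip]
    congr 1
    apply List.filter_eq_self.mpr
    intro p hp
    simpa using pvSplit_ne_nil t [] [] (by simp) p hp

-- main mutual invariant: parse_node / children-loop agree with the flat scan
theorem pvMain : ∀ f : Nat,
    (∀ r : List Char, 2 * r.length + 2 ≤ f →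
      (pvParseNodeA f ('(' :: r)).2.length ≤ r.length ∧
      pvB ('(' :: r) = (pvParseNodeA f ('(' :: r)).1 ++ pvB (pvParseNodeA f ('(' :: r)).2) ∧
    (∀ t : List Char, 2 * t.length + 3 ≤ f →
      (pvChildLoopA f ('(' :: t)).2.length ≤ t.length ∧
      pvB ('(' :: t) = (pvChildLoopA f ('(' :: t)).1 ++ pvB (pvChildLoopA f ('(' :: t)).2) := by
  intro f
  induction f using Nat.strong_induction_on with
  | _ f ih =>
    cases f with
    | zero => exact ⟨fun r hr => absurd hr (by omega), fun t ht => absurd ht (by omega)⟩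
    | succ f' =>
      have ihP := (ih f' (Nat.lt_succ_self _)).1
      have ihQ := (ih f' (Nat.lt_succ_self _)).2
      constructor
      · -- parse_node
        intro r hr
        have hl2len : (pvSkipWs (pvScanLabel (pvSkipWs r))).length ≤ r.length :=
          le_trans (pvSkipWs_len _) (le_trans (pvScanLabel_len _) (pvSkipWs_len _))
        simp only [pvParseNodeA, List.tail_cons]
        by_cases hh : (pvSkipWs (pvScanLabel (pvSkipWs r))).head? = some '('
        · -- children branch
          obtain ⟨t2, hl2⟩ : ∃ t2, pvSkipWs (pvScanLabel (pvSkipWs r)) = '(' :: t2 := by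
            cases h' : (pvSkipWs (pvScanLabel (pvSkipWs r))) with
            | nil => rw [h'] at hh; simp at hh
            | cons a b =>
              rw [h'] at hh; simp only [List.head?_cons, Option.some.injEq] at hh
              exact ⟨b, by rw [hh]⟩
          rw [hl2] at hl2len
          simp only [List.length_cons] at hl2len
          have hb : 2 * t2.length + 3 ≤ f' := by omega
          obtain ⟨hQlen, hQeq⟩ := ihQ t2 hb
          rw [if_pos hh, hl2]
          constructor
          · refine le_trans (pvSkipWs_len _) (le_trans ?_ (le_trans hQlen (by omega)))
            split
            · have := List.length_tail (l := (pvChildLoopA f' ('(' :: t2)).2); omega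
            · exact le_refl _
          · rw [pvB_open]
            simp only [hl2, List.head?_cons, if_true]
            rw [hQeq, pvB_close]
        · -- leaf branch
          rw [if_neg hh]
          dsimp only
          have h1 : (pvScanLeaf (pvSkipWs (pvScanLabel (pvSkipWs r)))).2.length ≤ r.length :=
            le_trans (pvScanLeaf_len _) hl2len
          constructor
          · refine le_trans (pvSkipWs_len _) ?_
            split
            · have := List.length_tail
                (l := (pvScanLeaf (pvSkipWs (pvScanLabel (pvSkipWs r)))).2); omega
            · exact h1
          · rw [pvB_open]
            dsimp only
            rw [if_neg hh]
            simp only [pvToken_eq, pvB_skipWs, pvB_close']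
      · -- children while-loop
        intro t ht
        obtain ⟨hPlen, hPeq⟩ := ihP t (by omega)
        simp only [pvChildLoopA]
        have hsk : (pvSkipWs (pvParseNodeA f' ('(' :: t)).2).length ≤ t.length :=
          le_trans (pvSkipWs_len _) hPlen
        by_cases hh : (pvSkipWs (pvParseNodeA f' ('(' :: t)).2).head? = some '('
        · obtain ⟨t2, hl2⟩ : ∃ t2, pvSkipWs (pvParseNodeA f' ('(' :: t)).2 = '(' :: t2 := by
            cases h' : pvSkipWs (pvParseNodeA f' ('(' :: t)).2 with
            | nil => rw [h'] at hh; simp at hh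
            | cons a b =>
              rw [h'] at hh; simp only [List.head?_cons, Option.some.injEq] at hh
              exact ⟨b, by rw [hh]⟩
          rw [hl2] at hsk
          simp only [List.length_cons] at hsk
          obtain ⟨hQlen, hQeq⟩ := ihQ t2 (by omega)
          rw [if_pos hh, hl2]
          constructor
          · exact le_trans hQlen (by omega)
          · rw [hPeq, ← pvB_skipWs (pvParseNodeA f' ('(' :: t)).2, hl2, hQeq, List.append_assoc]
        · rw [if_neg hh]
          exact ⟨hsk, by rw [hPeq, ← pvB_skipWs (pvParseNodeA f' ('(' :: t)).2]⟩

theorem pvTop_eq : ∀ f l, l.length < f → pvTopA f l = pvB l := by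
  intro f
  induction f with
  | zero => intro l h; omega
  | succ f ih =>
    intro l hl
    simp only [pvTopA]
    cases hsk : pvSkipWs l with
    | nil => rw [← pvB_skipWs l, hsk]; rfl
    | cons c r =>
      have hlen : r.length + 1 ≤ l.length := by
        have := pvSkipWs_len l; rw [hsk] at this; simpa using this
      by_cases hc : c = '('
      · subst hc
        simp only [if_true]
        obtain ⟨hP1, hP2⟩ := (pvMain (2 * r.length + 4)).1 r (by omega)
        rw [← pvB_skipWs l, hsk, hP2]
        congr 1
        exact ih _ (by omega)
      · dsimp only
        rw [if_neg hc, ih r (by omega), ← pvB_cons_ne r hc, ← hsk, pvB_skipWs]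

-- ===== VERDICT (by name: the statement is the Claim_ definition above) =====
theorem parse_tree_leaves_py_spec : Claim_equal_parse_tree_leaves_py := by
  intro s _
  unfold Spec_parse_tree_leaves_py parse_tree_leaves_py parse_tree_leaves_py_alt
  by_cases h : (PySem.Str.strip s).toList = []
  · simp [h, pvBLoop]
  · simp only [h]
    exact pvTop_eq _ _ (Nat.lt_succ_self _)
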